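-- pv_equiv track=rewrite | github.com/damarisarmoa12/Intro | parcialpython.py | stock_productos
-- ===== SOURCE A (Python) =====
-- def stock_productos (stock_cambios : list[tuple[str,int]]) -> dict[str,tuple[int,int]]:
--     res = {}
--
--     for producto, cantidad in stock_cambios:
--         if producto in res: #se utiliza in res ya que queremos trabajar con los valores del diccionario de res, si no hacemos esto es como que nunca lo vimos
--          minimo,maximo = res[producto]
--          if cantidad > maximo:
--             maximo = cantidad
--          if cantidad < minimo:
--             minimo = cantidad
--          res[producto] = (minimo,maximo)
--         else:
--          res[producto] = (cantidad,cantidad)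
--     return res
-- ===== SOURCE B (Python) =====
-- def stock_productos(stock_cambios):
--     grupos = {}
--     for producto, cantidad in stock_cambios:
--         grupos.setdefault(producto, []).append(cantidad)
--     return {producto: (min(vals), max(vals)) for producto, vals in grupos.items()}
-- ===== Notes on version B (the rewrite author's own statement) =====
-- stated objective: idiomatic
-- what changed: Replaces the interleaved running-min/max dict update with a two-phase group-then-reduce: first collect all quantities per product via setdefault, then build the result with min()/max() over each group in a dict comprehension.
import Mathlib
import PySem

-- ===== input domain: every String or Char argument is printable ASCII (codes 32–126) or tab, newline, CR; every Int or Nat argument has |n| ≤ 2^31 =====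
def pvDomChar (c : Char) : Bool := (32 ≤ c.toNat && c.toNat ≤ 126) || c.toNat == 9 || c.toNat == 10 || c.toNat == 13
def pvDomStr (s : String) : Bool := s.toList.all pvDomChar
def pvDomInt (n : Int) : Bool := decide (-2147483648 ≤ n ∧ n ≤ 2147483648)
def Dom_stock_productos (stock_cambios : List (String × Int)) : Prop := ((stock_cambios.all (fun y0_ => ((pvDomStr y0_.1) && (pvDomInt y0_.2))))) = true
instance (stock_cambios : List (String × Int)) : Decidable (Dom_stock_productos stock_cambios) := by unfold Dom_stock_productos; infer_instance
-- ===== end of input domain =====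

-- B replaces A's interleaved running-min/max dict update by a two-phase group-then-reduce
-- (collect each product's quantities, then take min/max of each group); objective: idiomatic.

-- ===== PORT A =====
-- one loop step of A: branch on whether the product was seen, update running (min, max)
def pvStepA (res : PySem.Dict String (Int × Int)) (pc : String × Int) : PySem.Dict String (Int × Int) :=
  if res.contains pc.1 then
    let mm := res.getD pc.1 (0, 0)   -- default never used: contains holds, so res[pc.1] exists
    let maximo := if pc.2 > mm.2 then pc.2 else mm.2
    let minimo := if pc.2 < mm.1 then pc.2 else mm.1
    res.insert pc.1 (minimo, maximo)
  else
    res.insert pc.1 (pc.2, pc.2)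

def stock_productos (stock_cambios : List (String × Int)) : List (String × Int × Int) :=
  (stock_cambios.foldl pvStepA PySem.Dict.empty).items

-- ===== PORT B =====
-- Python min/max of a list; exact for nonempty lists (B only applies them to nonempty groups)
def pyMinList (l : List Int) : Int := match l with | [] => 0 | v :: vs => vs.foldl min v
def pyMaxList (l : List Int) : Int := match l with | [] => 0 | v :: vs => vs.foldl max v

def stock_productos_alt (stock_cambios : List (String × Int)) : List (String × Int × Int) :=
  -- grupos.setdefault(producto, []).append(cantidad)  ≡  modify producto [] (· ++ [cantidad])
  ((stock_cambios.foldl (fun d pc => d.modify pc.1 [] (· ++ [pc.2])) PySem.Dict.empty).items).map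
    (fun p => (p.1, (pyMinList p.2, pyMaxList p.2)))

-- ===== PRECONDITION & SPEC =====
def Spec_stock_productos (stock_cambios : List (String × Int)) (out : List (String × Int × Int)) : Prop := out = stock_productos_alt stock_cambios
instance (stock_cambios : List (String × Int)) (out : List (String × Int × Int)) : Decidable (Spec_stock_productos stock_cambios out) := by unfold Spec_stock_productos; infer_instance

-- ===== CLAIM (what is proved, stated in full; the proofs are below) =====
def Claim_equal_stock_productos : Prop := ∀ (stock_cambios : List (String × Int)), Dom_stock_productos stock_cambios → Spec_stock_productos stock_cambios (stock_productos stock_cambios)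

-- ===== LEMMAS AND PROOFS =====

-- A's step is an insert at key pc.1 (both branches insert there)
def pvValA (res : PySem.Dict String (Int × Int)) (pc : String × Int) : Int × Int :=
  if res.contains pc.1 then
    (if pc.2 < (res.getD pc.1 (0, 0)).1 then pc.2 else (res.getD pc.1 (0, 0)).1,
     if pc.2 > (res.getD pc.1 (0, 0)).2 then pc.2 else (res.getD pc.1 (0, 0)).2)
  else (pc.2, pc.2)

theorem pvStepA_eq (res : PySem.Dict String (Int × Int)) (pc : String × Int) :
    pvStepA res pc = res.insert pc.1 (pvValA res pc) := by
  unfold pvStepA pvValA; split <;> rfl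

-- the group of quantities recorded for product c
def pvGrp (l : List (String × Int)) (c : String) : List Int :=
  (l.filter (fun p => p.1 == c)).map Prod.snd

theorem pvGetA (l : List (String × Int)) (c : String) :
    ((l.foldl pvStepA PySem.Dict.empty).get? c) =
      match pvGrp l c with
      | [] => none
      | v :: vs => some (vs.foldl min v, vs.foldl max v) := by
  induction l using List.reverseRecOn with
  | nil => simp [pvGrp, PySem.Dict.get?_empty]
  | append_singleton l x ih =>
    obtain ⟨xp, xc⟩ := x
    rw [List.foldl_append, List.foldl_cons, List.foldl_nil, pvStepA_eq]
    have hgrp : pvGrp (l ++ [(xp, xc)]) c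
        = pvGrp l c ++ (if xp == c then [xc] else []) := by
      simp only [pvGrp, List.filter_append, List.map_append]
      by_cases h : xp = c <;> simp [h]
    by_cases hx : xp = c
    · subst hx
      rw [PySem.Dict.get?_insert_self]
      have hc : (l.foldl pvStepA PySem.Dict.empty).contains xp
          = ((l.foldl pvStepA PySem.Dict.empty).get? xp).isSome :=
        PySem.Dict.contains_eq_isSome_get? _ _
      unfold pvValA
      simp only [hgrp, beq_self_eq_true, if_true]
      rcases hg : pvGrp l xp with _ | ⟨v, vs⟩
      · rw [hc, ih, hg]
        simp
      · rw [hc, ih, hg]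
        simp only [Option.isSome_some, if_pos]
        have hgd : (l.foldl pvStepA PySem.Dict.empty).getD xp (0, 0)
            = (vs.foldl min v, vs.foldl max v) := by
          rw [PySem.Dict.getD_eq_get?_getD, ih, hg]
          rfl
        rw [hgd]
        simp only [List.cons_append, List.foldl_append, List.foldl_cons, List.foldl_nil,
          Option.some.injEq, Prod.mk.injEq]
        constructor <;> (simp only [min_def, max_def]; split_ifs <;> omega)
    · have hne : c ≠ xp := fun h => hx h.symm
      rw [PySem.Dict.get?_insert_of_ne _ _ hne, ih]
      have : (xp == c) = false := by simp [hx]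
      rw [hgrp, this]
      simp

theorem pvGrp_getD (l : List (String × Int)) (c : String) :
    ((l.foldl (fun d pc => d.modify pc.1 [] (· ++ [pc.2])) PySem.Dict.empty).getD c []) = pvGrp l c := by
  rw [PySem.Dict.getD_foldl_modify_append]
  simp [pvGrp, PySem.Dict.getD_empty]

theorem pv_main (l : List (String × Int)) :
    stock_productos l = stock_productos_alt l := by
  unfold stock_productos stock_productos_alt
  have hstep : (fun (d : PySem.Dict String (Int × Int)) (pc : String × Int)
      => pvStepA d pc) = fun d pc => d.insert pc.1 (pvValA d pc) := by
    funext d pc; exact pvStepA_eq d pc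
  have hnA : (l.foldl pvStepA PySem.Dict.empty).keys.Nodup := by
    show (l.foldl (fun d pc => pvStepA d pc) PySem.Dict.empty).keys.Nodup
    rw [hstep]
    exact PySem.Dict.nodup_keys_foldl_insert_key l Prod.fst _ _ PySem.Dict.nodup_keys_empty
  have hnB : ((l.foldl (fun d pc => d.modify pc.1 [] (· ++ [pc.2])) PySem.Dict.empty)).keys.Nodup :=
    PySem.Dict.nodup_keys_foldl_modify_key l Prod.fst [] _ _ PySem.Dict.nodup_keys_empty
  have hkA : (l.foldl pvStepA PySem.Dict.empty).keys = PySem.Set.ofList (l.map Prod.fst) := by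
    show (l.foldl (fun d pc => pvStepA d pc) PySem.Dict.empty).keys = _
    rw [hstep, PySem.Dict.keys_foldl_insert_key, PySem.Dict.keys_empty,
        PySem.Set.update_nil_left]
  have hkB : ((l.foldl (fun d pc => d.modify pc.1 [] (· ++ [pc.2])) PySem.Dict.empty)).keys
      = PySem.Set.ofList (l.map Prod.fst) := by
    rw [PySem.Dict.keys_foldl_modify_key, PySem.Dict.keys_empty, PySem.Set.update_nil_left]
  rw [PySem.Dict.items_eq_map_keys _ hnA (0, 0),
      PySem.Dict.items_eq_map_keys _ hnB [], List.map_map]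
  rw [hkA, hkB]
  apply List.map_congr_left
  intro k hk
  have hkmem : k ∈ l.map Prod.fst := (PySem.Set.mem_ofList _ _).mp hk
  have hne : pvGrp l k ≠ [] := by
    rcases List.mem_map.mp hkmem with ⟨p, hp, hpk⟩
    simp only [pvGrp, ne_eq, List.map_eq_nil_iff, List.filter_eq_nil_iff, not_forall]
    exact ⟨p, hp, by simp [hpk]⟩
  simp only [Function.comp]
  rcases hg : pvGrp l k with _ | ⟨v, vs⟩
  · exact absurd hg hne
  · rw [PySem.Dict.getD_eq_get?_getD, pvGetA, hg, pvGrp_getD, hg]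
    simp [pyMinList, pyMaxList]

-- ===== VERDICT (by name: the statement is the Claim_ definition above) =====
theorem stock_productos_spec : Claim_equal_stock_productos := by
  intro l _
  exact pv_main l
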